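-- pv_equiv track=rewrite | github.com/kagemeka/dsalgo-python | dsalgo/graph_theory/euler_tour.py | compute_parent
-- ===== SOURCE A (Python) =====
-- import typing
--
-- def compute_parent(
--     tour: typing.List[int],
-- ) -> typing.List[typing.Optional[int]]:
--     """Compute parent from Euler-tour-on-edges.
--
--     Args:
--         tour (typing.List[int]): euler tour on edges.
--
--     Returns:
--         typing.List[typing.Optional[int]]:
--             parent list.
--             the tour root's parent is None.
--
--     Examples:
--         >>> tour_edges = [0, 1, 4, -5, 2, -3, -2, 3, -4, -1]
--         >>> compute_parent(tour_edges)
--         [None, 0, 1, 0, 1]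
--     """
--     n = len(tour) >> 1
--     parent: typing.List[typing.Optional[int]] = [None] * n
--     st = [tour[0]]
--     for u in tour[1:]:
--         if u < 0:
--             st.pop()
--             continue
--         parent[u] = st[-1]
--         st.append(u)
--
--     return parent
-- ===== SOURCE B (Python) =====
-- import typing
--
--
-- def compute_parent(
--     tour: typing.List[int],
-- ) -> typing.List[typing.Optional[int]]:
--     n = len(tour) >> 1
--     parent: typing.List[typing.Optional[int]] = [None] * n
--
--     def parse(i: int, p: int) -> int:
--         # records the children of p starting at tour[i]; returns the index
--         # just past the close of p's subtree
--         while i < len(tour) and tour[i] >= 0: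
--             u = tour[i]
--             parent[u] = p
--             i = parse(i + 1, u)
--         return i + 1
--
--     parse(1, tour[0])
--     return parent
-- ===== Notes on version B (the rewrite author's own statement) =====
-- stated objective: alternative
-- what changed: The iterative explicit-stack scan is replaced by a recursive-descent parser over the tree structure: the current ancestor travels as a function parameter and each recursive call consumes exactly one subtree of the tour, so no stack data structure is built, popped or peeked.
import Mathlib
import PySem

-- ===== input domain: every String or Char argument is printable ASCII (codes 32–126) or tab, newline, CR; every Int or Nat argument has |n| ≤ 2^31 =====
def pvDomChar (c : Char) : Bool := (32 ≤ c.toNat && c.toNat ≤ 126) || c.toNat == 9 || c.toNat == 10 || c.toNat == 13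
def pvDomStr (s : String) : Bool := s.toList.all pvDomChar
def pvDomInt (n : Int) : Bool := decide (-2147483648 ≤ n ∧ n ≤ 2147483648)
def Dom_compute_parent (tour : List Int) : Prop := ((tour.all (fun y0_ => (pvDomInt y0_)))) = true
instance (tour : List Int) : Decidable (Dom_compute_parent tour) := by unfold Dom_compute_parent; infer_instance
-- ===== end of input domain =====

-- B replaces A's iterative explicit-stack scan by a recursive-descent parser: the current
-- ancestor travels as a parameter and each call consumes one subtree (objective: alternative).

-- ===== PORT A =====
def computeParentLoopA : List (Option Int) → List Int → List Int → List (Option Int)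
  | p, _, [] => p
  | p, st, u :: rest =>
    if u < 0 then computeParentLoopA p st.tail rest
    else computeParentLoopA (PySem.List.pySetD p u (some (st.headD 0))) (u :: st) rest

def compute_parent (tour : List Int) : List (Option Int) :=
  match tour with
  | [] => []            -- Python raises IndexError on tour[0]; excluded by Pre_
  | t0 :: rest => computeParentLoopA (List.replicate ((rest.length + 1) >>> 1) none) [t0] rest

-- ===== PORT B =====
-- Source B's parse(i, p) over the suffix tour[i:]; fuel ≥ suffix length only makes the
-- recursion structurally terminating (Python's parse has no fuel and no base case change):
-- with fuel ≥ l.length the fuel-0 clause is never reached.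
-- Returns (suffix just past the close of p's subtree, updated parent array).
def parseB : Nat → List Int → Int → List (Option Int) → List Int × List (Option Int)
  | _, [], _, par => ([], par)                -- i ≥ len(tour): while ends, return i+1
  | fuel + 1, u :: rest, p, par =>
    if u < 0 then (rest, par)                 -- close: while ends, return i+1 skips it
    else
      let r := parseB fuel rest u (PySem.List.pySetD par u (some p))
      parseB fuel r.1 p r.2
  | 0, l, _, par => (l.drop 1, par)           -- fuel exhausted: unreachable for fuel ≥ l.length

def compute_parent_alt (tour : List Int) : List (Option Int) :=
  match tour with
  | [] => []            -- Python raises IndexError on tour[0]; excluded by Pre_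
  | t0 :: rest =>
      (parseB rest.length rest t0 (List.replicate ((rest.length + 1) >>> 1) none)).2

-- ===== PRECONDITION & SPEC =====
-- stack discipline of A: stack depth before every step of the loop stays ≥ 1
def pvDepthOk : Int → List Int → Bool
  | _, [] => true
  | d, u :: rest => 1 ≤ d && pvDepthOk (if u < 0 then d - 1 else d + 1) rest

-- Pre_ is exactly where Python A returns: a nonempty tour, never popping or peeking an
-- empty stack (pvDepthOk), and every entered vertex inside the parent array (else
-- parent[u] raises IndexError).
def Pre_compute_parent (tour : List Int) : Prop :=
  tour ≠ [] ∧
  pvDepthOk 1 (tour.drop 1) = true ∧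
  (∀ u ∈ tour.drop 1, 0 ≤ u → u < ((tour.length >>> 1 : Nat) : Int))

instance (tour : List Int) : Decidable (Pre_compute_parent tour) := by
  unfold Pre_compute_parent; infer_instance

def pvWitness_compute_parent : List Int := [0, 1, 4, -5, 2, -3, -2, 3, -4, -1]

def Spec_compute_parent (tour : List Int) (out : List (Option Int)) : Prop := out = compute_parent_alt tour
instance (tour : List Int) (out : List (Option Int)) : Decidable (Spec_compute_parent tour out) := by unfold Spec_compute_parent; infer_instance

-- ===== CLAIM (what is proved, stated in full; the proofs are below) =====
def Claim_equal_compute_parent : Prop := ∀ (tour : List Int), Dom_compute_parent tour → Pre_compute_parent tour → Spec_compute_parent tour (compute_parent tour)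

-- ===== LEMMAS AND PROOFS =====

lemma pvDepthOk_nonpos : ∀ (l : List Int) (d : Int), pvDepthOk d l = true → d ≤ 0 → l = [] := by
  intro l d h hd
  cases l with
  | nil => rfl
  | cons u t =>
    simp only [pvDepthOk, Bool.and_eq_true, decide_eq_true_eq] at h
    omega

-- parseB shortens its suffix and turns "depth ok from d+1" into "depth ok from d":
-- it consumes exactly one closed subtree (or everything, if the tour ends first)
lemma parseB_depth : ∀ (fuel : Nat) (l : List Int), l.length ≤ fuel →
    ∀ (d : Int) (p : Int) (par : List (Option Int)), pvDepthOk (d + 1) l = true →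
      (parseB fuel l p par).1.length ≤ l.length ∧
      pvDepthOk d (parseB fuel l p par).1 = true := by
  intro fuel
  induction fuel with
  | zero =>
    intro l hl d p par _
    have : l = [] := List.eq_nil_of_length_eq_zero (Nat.le_zero.mp hl)
    subst this
    exact ⟨le_rfl, rfl⟩
  | succ f ih =>
    intro l hl d p par hok
    cases l with
    | nil => exact ⟨le_rfl, rfl⟩
    | cons u rest =>
      simp only [pvDepthOk, Bool.and_eq_true, decide_eq_true_eq] at hok
      obtain ⟨-, hok⟩ := hok
      by_cases hu : u < 0
      · rw [if_pos hu] at hok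
        simp only [parseB, if_pos hu]
        refine ⟨by simp, ?_⟩
        have e : d + 1 - 1 = d := by ring
        rw [e] at hok
        exact hok
      · rw [if_neg hu] at hok
        have hrest : rest.length ≤ f := by simpa using hl
        obtain ⟨h1, h2⟩ := ih rest hrest (d + 1) u (PySem.List.pySetD par u (some p)) hok
        obtain ⟨h3, h4⟩ := ih (parseB f rest u (PySem.List.pySetD par u (some p))).1
          (le_trans h1 hrest) d p
          (parseB f rest u (PySem.List.pySetD par u (some p))).2 h2
        simp only [parseB, if_neg hu]
        exact ⟨le_trans h3 (le_trans h1 (by simp)), h4⟩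

-- the simulation: A's machine with stack p :: st on suffix l equals B's parse of
-- p's subtree followed by A's machine on what is left, with p popped
lemma loopA_parse : ∀ (fuel : Nat) (l : List Int), l.length ≤ fuel →
    ∀ (p : Int) (st : List Int) (par : List (Option Int)),
      pvDepthOk ((st.length : Int) + 1) l = true →
      computeParentLoopA par (p :: st) l
        = computeParentLoopA (parseB fuel l p par).2 st (parseB fuel l p par).1 := by
  intro fuel
  induction fuel with
  | zero =>
    intro l hl p st par _
    have : l = [] := List.eq_nil_of_length_eq_zero (Nat.le_zero.mp hl)
    subst this
    rfl
  | succ f ih =>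
    intro l hl p st par hok
    cases l with
    | nil => rfl
    | cons u rest =>
      simp only [pvDepthOk, Bool.and_eq_true, decide_eq_true_eq] at hok
      obtain ⟨-, hok⟩ := hok
      by_cases hu : u < 0
      · rw [if_pos hu] at hok
        simp [computeParentLoopA, parseB, hu]
      · rw [if_neg hu] at hok
        have hrest : rest.length ≤ f := by simpa using hl
        have hok2 : pvDepthOk (((p :: st).length : Int) + 1) rest = true := by
          simp only [List.length_cons]
          have e : ((st.length + 1 : Nat) : Int) + 1 = (st.length : Int) + 1 + 1 := by
            push_cast; ring
          rw [e]; exact hok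
        have step1 := ih rest hrest u (p :: st) (PySem.List.pySetD par u (some p)) hok2
        obtain ⟨hlen1, hdep1⟩ := parseB_depth f rest hrest ((st.length : Int) + 1) u
          (PySem.List.pySetD par u (some p)) hok
        have step2 := ih (parseB f rest u (PySem.List.pySetD par u (some p))).1
          (le_trans hlen1 hrest) p st
          (parseB f rest u (PySem.List.pySetD par u (some p))).2 hdep1
        simp only [computeParentLoopA, parseB, if_neg hu, List.headD_cons]
        rw [step1, step2]

-- ===== VERDICT (by name: the statement is the Claim_ definition above) =====
theorem compute_parent_spec : Claim_equal_compute_parent := by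
  intro tour _ hpre
  obtain ⟨hne, hok, -⟩ := hpre
  unfold Spec_compute_parent
  cases tour with
  | nil => exact absurd rfl hne
  | cons t0 rest =>
    simp only [List.drop_succ_cons, List.drop_zero] at hok
    have hmain := loopA_parse rest.length rest le_rfl t0 []
      (List.replicate ((rest.length + 1) >>> 1) none) (by simpa using hok)
    obtain ⟨-, hdep⟩ := parseB_depth rest.length rest le_rfl 0 t0
      (List.replicate ((rest.length + 1) >>> 1) none) (by simpa using hok)
    have hnil := pvDepthOk_nonpos _ 0 hdep le_rfl
    simp only [compute_parent, compute_parent_alt]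
    rw [hmain, hnil]
    rfl
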